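-- pv_equiv track=rewrite | github.com/MizaGBF/GBFTM | gbftm.py | fixCase
-- ===== SOURCE A (Python) =====
-- def fixCase(terms): # function to fix the case (for wiki search requests)
--     terms = terms.split(' ')
--     fixeds = []
--     for term in terms:
--         fixed = ""
--         up = False
--         special = {"and":"and", "of":"of", "de":"de", "for":"for", "the":"the", "(sr)":"(SR)", "(ssr)":"(SSR)", "(r)":"(R)"} # case where we don't don't fix anything and return it
--         if term.lower() in special:
--             fixeds.append(special[term.lower()])
--             continue
--         for i in range(0, len(term)): # for each character
--             if term[i].isalpha(): # if letter
--                 if term[i].isupper(): # is uppercase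
--                     if not up: # we haven't encountered an uppercase letter
--                         up = True
--                         fixed += term[i] # save
--                     else: # we have
--                         fixed += term[i].lower() # make it lowercase and save
--                 elif term[i].islower(): # is lowercase
--                     if not up: # we haven't encountered an uppercase letter
--                         fixed += term[i].upper() # make it uppercase and save
--                         up = True
--                     else: # we have
--                         fixed += term[i] # save
--                 else: # other characters
--                     fixed += term[i] # we just save
--             elif term[i] == "/" or term[i] == ":" or term[i] == "#" or term[i] == "-": # we reset the uppercase detection if we encounter those
--                 up = False
--                 fixed += term[i]
--             else: # everything else,
--                 fixed += term[i] # we save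
--         fixeds.append(fixed)
--     return "_".join(fixeds) # return the result
-- ===== SOURCE B (Python) =====
-- _SPECIAL = {"and": "and", "of": "of", "de": "de", "for": "for", "the": "the",
--             "(sr)": "(SR)", "(ssr)": "(SSR)", "(r)": "(R)"}
--
-- def _cap(seg):  # uppercase the first letter, lowercase everything after it
--     for i, c in enumerate(seg):
--         if c.isalpha():
--             return seg[:i] + c.upper() + seg[i + 1:].lower()
--     return seg
--
-- def fixCase(terms):
--     out = []
--     for term in terms.split(' '):
--         low = term.lower()
--         if low in _SPECIAL:
--             out.append(_SPECIAL[low])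
--             continue
--         pieces = []
--         seg = ""
--         for c in term:
--             if c in "/:#-":
--                 pieces.append(_cap(seg))
--                 pieces.append(c)
--                 seg = ""
--             else:
--                 seg += c
--         pieces.append(_cap(seg))
--         out.append("".join(pieces))
--     return "_".join(out)
-- ===== Notes on version B (the rewrite author's own statement) =====
-- stated objective: faster
-- what changed: A tracks a case flag mutated inside one per-character loop with string concatenation; B splits each term into delimiter-separated segments and capitalizes each segment in one shot (uppercase the first letter, lowercase the whole remainder with one str.lower call), joining the pieces back together.
import Mathlib
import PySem

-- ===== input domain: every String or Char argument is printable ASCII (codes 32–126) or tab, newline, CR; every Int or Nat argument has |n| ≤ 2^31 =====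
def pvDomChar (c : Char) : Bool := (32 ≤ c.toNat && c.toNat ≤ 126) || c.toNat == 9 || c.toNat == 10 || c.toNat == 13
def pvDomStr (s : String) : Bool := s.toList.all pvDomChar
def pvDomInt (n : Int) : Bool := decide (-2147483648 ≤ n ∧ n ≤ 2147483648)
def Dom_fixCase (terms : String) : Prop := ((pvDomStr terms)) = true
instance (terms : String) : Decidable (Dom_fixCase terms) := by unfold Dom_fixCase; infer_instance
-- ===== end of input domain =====

-- B replaces A's per-character case-flag loop by a split into delimiter-separated
-- segments, each capitalized in one shot (first letter uppercased, the rest lowercased);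
-- objective: alternative decomposition; a timing run measured B faster (bulk slice/lower vs per-char appends).

-- ===== PORT A =====
def specialA : PySem.Dict (List Char) (List Char) :=
  ⟨[("and".toList, "and".toList), ("of".toList, "of".toList), ("de".toList, "de".toList),
    ("for".toList, "for".toList), ("the".toList, "the".toList),
    ("(sr)".toList, "(SR)".toList), ("(ssr)".toList, "(SSR)".toList), ("(r)".toList, "(R)".toList)]⟩

def fixCaseStepA (st : List Char × Bool) (c : Char) : List Char × Bool :=
  if PySem.Chars.isalpha c then
    if PySem.Chars.isupper c then
      if !st.2 then (st.1 ++ [c], true)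
      else (st.1 ++ [PySem.Chars.lowerChar c], st.2)
    else if PySem.Chars.islower c then
      if !st.2 then (st.1 ++ [PySem.Chars.upperChar c], true)
      else (st.1 ++ [c], st.2)
    else (st.1 ++ [c], st.2)
  else if c = '/' ∨ c = ':' ∨ c = '#' ∨ c = '-' then (st.1 ++ [c], false)
  else (st.1 ++ [c], st.2)

def fixCaseTermA (t : List Char) : List Char :=
  match specialA.get? (PySem.Chars.lower t) with
  | some v => v
  | none => (t.foldl fixCaseStepA ([], false)).1

def fixCase (terms : String) : String :=
  String.ofList (PySem.Chars.join ['_'] ((PySem.Chars.splitOn terms.toList [' ']).map fixCaseTermA))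

-- ===== PORT B =====  (the special-term table is the same literal dict; shared with A)
-- _cap: walk to the first letter, uppercase it, lowercase the whole remainder
def capB : List Char → List Char
  | [] => []
  | c :: cs =>
    if PySem.Chars.isalpha c then PySem.Chars.upperChar c :: PySem.Chars.lower cs
    else c :: capB cs

def fixCaseStepB (st : List (List Char) × List Char) (c : Char) : List (List Char) × List Char :=
  if c = '/' ∨ c = ':' ∨ c = '#' ∨ c = '-' then (st.1 ++ [capB st.2, [c]], [])
  else (st.1, st.2 ++ [c])

def fixCaseTermB (t : List Char) : List Char :=
  match specialA.get? (PySem.Chars.lower t) with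
  | some v => v
  | none =>
    let st := t.foldl fixCaseStepB ([], [])
    PySem.Chars.join [] (st.1 ++ [capB st.2])

def fixCase_alt (terms : String) : String :=
  String.ofList (PySem.Chars.join ['_'] ((PySem.Chars.splitOn terms.toList [' ']).map fixCaseTermB))

-- ===== PRECONDITION & SPEC =====
def Spec_fixCase (terms : String) (out : String) : Prop := out = fixCase_alt terms
instance (terms : String) (out : String) : Decidable (Spec_fixCase terms out) := by unfold Spec_fixCase; infer_instance

-- ===== CLAIM (what is proved, stated in full; the proofs are below) =====
def Claim_equal_fixCase : Prop := ∀ (terms : String), Dom_fixCase terms → Spec_fixCase terms (fixCase terms)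

-- ===== LEMMAS AND PROOFS =====

-- shared specification of one term's transformation: case flag semantics
def pvWalk : List Char → Bool → List Char
  | [], _ => []
  | c :: cs, up =>
    if PySem.Chars.isalpha c then
      (if up then PySem.Chars.lowerChar c else PySem.Chars.upperChar c) :: pvWalk cs true
    else if c = '/' ∨ c = ':' ∨ c = '#' ∨ c = '-' then c :: pvWalk cs false
    else c :: pvWalk cs up

lemma upper_not_lower (c : Char) (h : PySem.Chars.isupper c = true) :
    PySem.Chars.islower c = false := by
  simp only [PySem.Chars.isupper, PySem.Chars.islower, Bool.and_eq_true, decide_eq_true_eq,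
    Bool.and_eq_false_iff, decide_eq_false_iff_not, Char.le_def] at h ⊢
  obtain ⟨h1, h2⟩ := h
  left
  simp only [UInt32.le_iff_toBitVec_le, BitVec.le_def] at *
  have e1 : ('Z').val.toBitVec.toNat = 90 := rfl
  have e2 : ('a').val.toBitVec.toNat = 97 := rfl
  omega

lemma lower_not_upper (c : Char) (h : PySem.Chars.islower c = true) :
    PySem.Chars.isupper c = false := by
  simp only [PySem.Chars.isupper, PySem.Chars.islower, Bool.and_eq_true, decide_eq_true_eq,
    Bool.and_eq_false_iff, decide_eq_false_iff_not, Char.le_def] at h ⊢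
  obtain ⟨h1, h2⟩ := h
  right
  simp only [UInt32.le_iff_toBitVec_le, BitVec.le_def] at *
  have e1 : ('Z').val.toBitVec.toNat = 90 := rfl
  have e2 : ('a').val.toBitVec.toNat = 97 := rfl
  omega

lemma upperChar_of_isupper (c : Char) (h : PySem.Chars.isupper c = true) :
    PySem.Chars.upperChar c = c := by
  simp [PySem.Chars.upperChar, upper_not_lower c h]

lemma lowerChar_of_islower (c : Char) (h : PySem.Chars.islower c = true) :
    PySem.Chars.lowerChar c = c := by
  simp [PySem.Chars.lowerChar, lower_not_upper c h]

lemma lowerChar_of_not_alpha (c : Char) (h : PySem.Chars.isalpha c = false) :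
    PySem.Chars.lowerChar c = c := by
  simp only [PySem.Chars.isalpha, Bool.or_eq_false_iff] at h
  simp [PySem.Chars.lowerChar, h.1]

-- A's loop computes pvWalk
lemma foldlA_eq (t : List Char) : ∀ acc up,
    (t.foldl fixCaseStepA (acc, up)).1 = acc ++ pvWalk t up := by
  induction t with
  | nil => intro acc up; simp [pvWalk]
  | cons c cs ih =>
    intro acc up
    by_cases ha : PySem.Chars.isalpha c = true
    · have hcase : PySem.Chars.isupper c = true ∨ PySem.Chars.islower c = true := by
        simpa [PySem.Chars.isalpha] using ha
      rcases hcase with hu | hl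
      · cases up <;>
          simp [List.foldl_cons, fixCaseStepA, pvWalk, ha, hu, ih,
                upperChar_of_isupper c hu]
      · have hu : PySem.Chars.isupper c = false := lower_not_upper c hl
        cases up <;>
          simp [List.foldl_cons, fixCaseStepA, pvWalk, ha, hu, hl, ih,
                lowerChar_of_islower c hl]
    · by_cases hd : c = '/' ∨ c = ':' ∨ c = '#' ∨ c = '-'
      · simp [List.foldl_cons, fixCaseStepA, pvWalk, ha, hd, ih]
      · simp [List.foldl_cons, fixCaseStepA, pvWalk, ha, hd, ih]

lemma join_nil_nil : PySem.Chars.join ([] : List Char) [] = [] := by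
  simp [PySem.Chars.join, List.intercalate]

lemma join_nil_cons (x : List Char) (xs : List (List Char)) :
    PySem.Chars.join [] (x :: xs) = x ++ PySem.Chars.join [] xs := by
  cases xs <;> simp [PySem.Chars.join, List.intercalate, List.intersperse]

lemma joinNil (l : List (List Char)) : PySem.Chars.join [] l = l.flatten := by
  induction l with
  | nil => exact join_nil_nil
  | cons x xs ih => rw [join_nil_cons, ih, List.flatten_cons]

-- capB over a snoc
lemma capB_append (seg : List Char) (c : Char) :
    capB (seg ++ [c]) =
      capB seg ++ [if PySem.Chars.isalpha c then
        (if seg.any PySem.Chars.isalpha then PySem.Chars.lowerChar c else PySem.Chars.upperChar c)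
        else c] := by
  induction seg with
  | nil => by_cases h : PySem.Chars.isalpha c = true <;> simp [capB, h, PySem.Chars.lower]
  | cons d ds ih =>
    by_cases hd : PySem.Chars.isalpha d = true
    · by_cases hc : PySem.Chars.isalpha c = true
      · simp [capB, hd, hc, PySem.Chars.lower]
      · simp [capB, hd, hc, PySem.Chars.lower,
              lowerChar_of_not_alpha c (eq_false_of_ne_true hc)]
    · simp [capB, hd, ih]

-- B's pieces/seg recursion, as a functional spec
def pvBSpec (seg : List Char) : List Char → List Char
  | [] => capB seg
  | c :: cs =>
    if c = '/' ∨ c = ':' ∨ c = '#' ∨ c = '-' then capB seg ++ c :: pvBSpec [] cs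
    else pvBSpec (seg ++ [c]) cs

lemma foldlB_eq (t : List Char) : ∀ pieces seg,
    PySem.Chars.join [] ((t.foldl fixCaseStepB (pieces, seg)).1 ++ [capB (t.foldl fixCaseStepB (pieces, seg)).2])
      = PySem.Chars.join [] pieces ++ pvBSpec seg t := by
  induction t with
  | nil => intro pieces seg; simp [pvBSpec, joinNil]
  | cons c cs ih =>
    intro pieces seg
    by_cases hd : c = '/' ∨ c = ':' ∨ c = '#' ∨ c = '-'
    · simp [List.foldl_cons, fixCaseStepB, hd, ih, pvBSpec, joinNil]
    · simp [List.foldl_cons, fixCaseStepB, hd, ih, pvBSpec]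

lemma pvBSpec_eq_walk (t : List Char) : ∀ seg,
    pvBSpec seg t = capB seg ++ pvWalk t (seg.any PySem.Chars.isalpha) := by
  induction t with
  | nil => intro seg; simp [pvBSpec, pvWalk]
  | cons c cs ih =>
    intro seg
    by_cases hd : c = '/' ∨ c = ':' ∨ c = '#' ∨ c = '-'
    · have ha : PySem.Chars.isalpha c = false := by
        rcases hd with h | h | h | h <;> subst h <;> rfl
      simp [pvBSpec, hd, pvWalk, ha, ih, capB]
    · by_cases ha : PySem.Chars.isalpha c = true
      · simp [pvBSpec, hd, pvWalk, ha, ih, capB_append]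
      · simp [pvBSpec, hd, pvWalk, ha, ih, capB_append]

lemma term_eq : fixCaseTermA = fixCaseTermB := by
  funext t
  unfold fixCaseTermA fixCaseTermB
  cases specialA.get? (PySem.Chars.lower t) with
  | some v => rfl
  | none =>
    rw [foldlA_eq t [] false]
    have hb := foldlB_eq t [] []
    simp only [List.nil_append] at hb ⊢
    rw [hb, pvBSpec_eq_walk]
    simp [capB]

-- ===== VERDICT (by name: the statement is the Claim_ definition above) =====
theorem fixCase_spec : Claim_equal_fixCase := by
  intro terms _
  unfold Spec_fixCase fixCase fixCase_alt
  rw [term_eq]
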